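-- pv_equiv track=rewrite | github.com/Tarunmass007/Christoper_official_bot | BOT/tools/braintree_cvv/iditarod_gate.py | _map_response_to_status
-- ===== SOURCE A (Python) =====
-- from typing import Optional, Tuple, List
--
-- def _map_response_to_status(err_msg: str) -> Tuple[str, str]:
--     u = err_msg.upper()
--     if any(x in u for x in ("CVV", "CVC", "SECURITY CODE", "VERIFICATION")):
--         return "ccn", err_msg[:80]
--     if any(x in u for x in ("DECLINED", "DO NOT HONOR", "NOT AUTHORIZED", "INVALID", "EXPIRED", "LOST", "STOLEN", "PICKUP", "RESTRICTED", "FRAUD", "REVOKED", "CANNOT AUTHORIZE", "POLICY", "DO NOT TRY AGAIN")):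
--         return "declined", err_msg[:80]
--     if any(x in u for x in ("INSUFFICIENT", "LIMIT")):
--         return "declined", err_msg[:80]
--     if any(x in u for x in ("STATUS CODE 2001", "2001")):
--         return "declined", err_msg[:80]
--     if any(x in u for x in ("STATUS CODE 2002", "2002")):
--         return "declined", err_msg[:80]
--     if any(x in u for x in ("STATUS CODE 2003", "2003")):
--         return "declined", err_msg[:80]
--     if any(x in u for x in ("STATUS CODE 2004", "2004")):
--         return "ccn", err_msg[:80]
--     if any(x in u for x in ("STATUS CODE 2005", "2005")):
--         return "declined", err_msg[:80]
--     if any(x in u for x in ("STATUS CODE 2006", "2006")):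
--         return "declined", err_msg[:80]
--     if "STATUS CODE" in u or "2106" in u:
--         return "declined", err_msg[:80]
--     return "error", err_msg[:80]
-- ===== SOURCE B (Python) =====
-- # Filter-then-aggregate: collect the priorities of ALL matching keywords, take the minimum,
-- # and map that winning priority to a status, instead of a sequential first-match cascade.
-- _PRIORITY = [
--     ("CVV", 0), ("CVC", 0), ("SECURITY CODE", 0), ("VERIFICATION", 0),
--     ("DECLINED", 1), ("DO NOT HONOR", 1), ("NOT AUTHORIZED", 1), ("INVALID", 1),
--     ("EXPIRED", 1), ("LOST", 1), ("STOLEN", 1), ("PICKUP", 1), ("RESTRICTED", 1),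
--     ("FRAUD", 1), ("REVOKED", 1), ("CANNOT AUTHORIZE", 1), ("POLICY", 1), ("DO NOT TRY AGAIN", 1),
--     ("INSUFFICIENT", 2), ("LIMIT", 2),
--     ("STATUS CODE 2001", 3), ("2001", 3),
--     ("STATUS CODE 2002", 4), ("2002", 4),
--     ("STATUS CODE 2003", 5), ("2003", 5),
--     ("STATUS CODE 2004", 6), ("2004", 6),
--     ("STATUS CODE 2005", 7), ("2005", 7),
--     ("STATUS CODE 2006", 8), ("2006", 8),
--     ("STATUS CODE", 9), ("2106", 9),
-- ]
--
-- def _map_response_to_status(err_msg):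
--     u = err_msg.upper()
--     hits = [p for kw, p in _PRIORITY if kw in u]
--     if not hits:
--         return "error", err_msg[:80]
--     best = min(hits)
--     return ("ccn" if best in (0, 6) else "declined"), err_msg[:80]
-- ===== Notes on version B (the rewrite author's own statement) =====
-- stated objective: alternative
-- what changed: Replaces the short-circuiting eleven-branch first-match cascade by a filter-then-aggregate pass: gather the priorities of all matching keywords, take min(hits), and map the winning priority (0 or 6 -> ccn, none -> error, else declined).
import Mathlib
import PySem

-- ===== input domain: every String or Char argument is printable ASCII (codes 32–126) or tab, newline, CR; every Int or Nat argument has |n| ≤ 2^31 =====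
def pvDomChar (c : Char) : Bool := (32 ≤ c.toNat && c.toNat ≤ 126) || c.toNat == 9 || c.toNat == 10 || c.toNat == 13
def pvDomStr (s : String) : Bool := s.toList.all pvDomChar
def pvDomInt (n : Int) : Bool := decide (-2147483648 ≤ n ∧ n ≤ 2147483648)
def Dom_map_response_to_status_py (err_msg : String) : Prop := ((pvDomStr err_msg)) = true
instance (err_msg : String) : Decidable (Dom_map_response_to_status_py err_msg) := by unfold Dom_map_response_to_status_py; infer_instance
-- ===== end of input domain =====

-- B replaces the short-circuit if-cascade by filter-then-aggregate: it collects the priorities of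
-- ALL matching keywords and maps min(hits) to a status (objective: alternative).

-- ===== PORT A =====
def map_response_to_status_py (err_msg : String) : String × String :=
  let u := PySem.Str.upper err_msg
  if ["CVV", "CVC", "SECURITY CODE", "VERIFICATION"].any (fun x => PySem.Str.isIn x u) then
    ("ccn", PySem.Str.slice err_msg none (some 80))
  else if ["DECLINED", "DO NOT HONOR", "NOT AUTHORIZED", "INVALID", "EXPIRED", "LOST", "STOLEN",
           "PICKUP", "RESTRICTED", "FRAUD", "REVOKED", "CANNOT AUTHORIZE", "POLICY",
           "DO NOT TRY AGAIN"].any (fun x => PySem.Str.isIn x u) then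
    ("declined", PySem.Str.slice err_msg none (some 80))
  else if ["INSUFFICIENT", "LIMIT"].any (fun x => PySem.Str.isIn x u) then
    ("declined", PySem.Str.slice err_msg none (some 80))
  else if ["STATUS CODE 2001", "2001"].any (fun x => PySem.Str.isIn x u) then
    ("declined", PySem.Str.slice err_msg none (some 80))
  else if ["STATUS CODE 2002", "2002"].any (fun x => PySem.Str.isIn x u) then
    ("declined", PySem.Str.slice err_msg none (some 80))
  else if ["STATUS CODE 2003", "2003"].any (fun x => PySem.Str.isIn x u) then
    ("declined", PySem.Str.slice err_msg none (some 80))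
  else if ["STATUS CODE 2004", "2004"].any (fun x => PySem.Str.isIn x u) then
    ("ccn", PySem.Str.slice err_msg none (some 80))
  else if ["STATUS CODE 2005", "2005"].any (fun x => PySem.Str.isIn x u) then
    ("declined", PySem.Str.slice err_msg none (some 80))
  else if ["STATUS CODE 2006", "2006"].any (fun x => PySem.Str.isIn x u) then
    ("declined", PySem.Str.slice err_msg none (some 80))
  else if PySem.Str.isIn "STATUS CODE" u || PySem.Str.isIn "2106" u then
    ("declined", PySem.Str.slice err_msg none (some 80))
  else
    ("error", PySem.Str.slice err_msg none (some 80))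

-- ===== PORT B =====
def pvPriority : List (String × Int) :=
  [ ("CVV", 0), ("CVC", 0), ("SECURITY CODE", 0), ("VERIFICATION", 0),
    ("DECLINED", 1), ("DO NOT HONOR", 1), ("NOT AUTHORIZED", 1), ("INVALID", 1),
    ("EXPIRED", 1), ("LOST", 1), ("STOLEN", 1), ("PICKUP", 1), ("RESTRICTED", 1),
    ("FRAUD", 1), ("REVOKED", 1), ("CANNOT AUTHORIZE", 1), ("POLICY", 1), ("DO NOT TRY AGAIN", 1),
    ("INSUFFICIENT", 2), ("LIMIT", 2),
    ("STATUS CODE 2001", 3), ("2001", 3),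
    ("STATUS CODE 2002", 4), ("2002", 4),
    ("STATUS CODE 2003", 5), ("2003", 5),
    ("STATUS CODE 2004", 6), ("2004", 6),
    ("STATUS CODE 2005", 7), ("2005", 7),
    ("STATUS CODE 2006", 8), ("2006", 8),
    ("STATUS CODE", 9), ("2106", 9) ]

def map_response_to_status_py_alt (err_msg : String) : String × String :=
  let u := PySem.Str.upper err_msg
  let hits := (pvPriority.filter (fun kp => PySem.Str.isIn kp.1 u)).map (fun kp => kp.2)
  -- Python guards `if not hits` before `min(hits)`; min? = none exactly on the empty list
  match PySem.List.min? hits (fun x => x) with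
  | none => ("error", PySem.Str.slice err_msg none (some 80))
  | some best =>
      (if best = 0 ∨ best = 6 then "ccn" else "declined", PySem.Str.slice err_msg none (some 80))

-- ===== PRECONDITION & SPEC =====
def Spec_map_response_to_status_py (err_msg : String) (out : String × String) : Prop := out = map_response_to_status_py_alt err_msg
instance (err_msg : String) (out : String × String) : Decidable (Spec_map_response_to_status_py err_msg out) := by unfold Spec_map_response_to_status_py; infer_instance

-- ===== CLAIM (what is proved, stated in full; the proofs are below) =====
def Claim_equal_map_response_to_status_py : Prop := ∀ (err_msg : String), Dom_map_response_to_status_py err_msg → Spec_map_response_to_status_py err_msg (map_response_to_status_py err_msg)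

-- ===== LEMMAS AND PROOFS =====

-- folding min over a list everything of which is ≥ the seed keeps the seed
theorem pvFoldlMin (t : List Int) : ∀ (x : Int), (∀ y ∈ t, x ≤ y) → t.foldl min x = x := by
  induction t with
  | nil => intro x _; rfl
  | cons a t ih =>
      intro x h
      simp only [List.foldl_cons, min_eq_left (h a (List.mem_cons_self ..))]
      exact ih x (fun y hy => h y (List.mem_cons_of_mem _ hy))

-- on a ≤-sorted list, Python's min is the head
theorem pvMinSorted (xs : List Int) (h : xs.Pairwise (· ≤ ·)) :
    PySem.List.min? xs (fun x => x) = xs.head? := by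
  cases xs with
  | nil => simp [PySem.List.min?_eq_none_iff]
  | cons x t =>
      rw [PySem.List.min?_id_cons]
      simp only [List.head?_cons]
      exact congrArg some (pvFoldlMin t x (fun y hy => (List.pairwise_cons.mp h).1 y hy))

-- head of the matched part of a constant-priority group
theorem pvGrpHead (P : String × Int → Bool) (i : Int) :
    ∀ (G : List (String × Int)), (∀ kp ∈ G, kp.2 = i) →
      ((G.filter P).map (fun kp => kp.2)).head? = if G.any P then some i else none := by
  intro G hG
  induction G with
  | nil => simp
  | cons a t ih =>
      by_cases hp : P a = true
      · simp [hp, hG a (List.mem_cons_self ..)]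
      · simp only [List.filter_cons, if_neg, Bool.false_eq_true, not_false_iff,
          List.any_cons, hp, Bool.false_or]
        exact ih (fun kp hkp => hG kp (List.mem_cons_of_mem _ hkp))

-- pvPriority split into its ten constant-priority groups
theorem pvSplit :
    pvPriority =
      [("CVV", (0:Int)), ("CVC", 0), ("SECURITY CODE", 0), ("VERIFICATION", 0)] ++
      [("DECLINED", 1), ("DO NOT HONOR", 1), ("NOT AUTHORIZED", 1), ("INVALID", 1),
       ("EXPIRED", 1), ("LOST", 1), ("STOLEN", 1), ("PICKUP", 1), ("RESTRICTED", 1),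
       ("FRAUD", 1), ("REVOKED", 1), ("CANNOT AUTHORIZE", 1), ("POLICY", 1), ("DO NOT TRY AGAIN", 1)] ++
      [("INSUFFICIENT", 2), ("LIMIT", 2)] ++
      [("STATUS CODE 2001", 3), ("2001", 3)] ++
      [("STATUS CODE 2002", 4), ("2002", 4)] ++
      [("STATUS CODE 2003", 5), ("2003", 5)] ++
      [("STATUS CODE 2004", 6), ("2004", 6)] ++
      [("STATUS CODE 2005", 7), ("2005", 7)] ++
      [("STATUS CODE 2006", 8), ("2006", 8)] ++
      [("STATUS CODE", 9), ("2106", 9)] := rfl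

-- the priorities in pvPriority are nondecreasing, hence so are the matched ones
theorem pvHitsSorted (P : String × Int → Bool) :
    ((pvPriority.filter P).map (fun kp => kp.2)).Pairwise (· ≤ ·) := by
  have hsub : List.Sublist ((pvPriority.filter P).map (fun kp : String × Int => kp.2))
      (pvPriority.map (fun kp => kp.2)) :=
    List.Sublist.map _ List.filter_sublist
  have hall : (pvPriority.map (fun kp : String × Int => kp.2)).Pairwise (· ≤ ·) := by decide
  exact hall.sublist hsub

-- the match-on-min form equals the if-cascade, for any u and snippet
set_option maxHeartbeats 2000000 in
theorem pvAltEq (u snip : String) :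
    (if ["CVV", "CVC", "SECURITY CODE", "VERIFICATION"].any (fun x => PySem.Str.isIn x u) then
      (("ccn" : String), snip)
    else if ["DECLINED", "DO NOT HONOR", "NOT AUTHORIZED", "INVALID", "EXPIRED", "LOST", "STOLEN",
             "PICKUP", "RESTRICTED", "FRAUD", "REVOKED", "CANNOT AUTHORIZE", "POLICY",
             "DO NOT TRY AGAIN"].any (fun x => PySem.Str.isIn x u) then ("declined", snip)
    else if ["INSUFFICIENT", "LIMIT"].any (fun x => PySem.Str.isIn x u) then ("declined", snip)
    else if ["STATUS CODE 2001", "2001"].any (fun x => PySem.Str.isIn x u) then ("declined", snip)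
    else if ["STATUS CODE 2002", "2002"].any (fun x => PySem.Str.isIn x u) then ("declined", snip)
    else if ["STATUS CODE 2003", "2003"].any (fun x => PySem.Str.isIn x u) then ("declined", snip)
    else if ["STATUS CODE 2004", "2004"].any (fun x => PySem.Str.isIn x u) then ("ccn", snip)
    else if ["STATUS CODE 2005", "2005"].any (fun x => PySem.Str.isIn x u) then ("declined", snip)
    else if ["STATUS CODE 2006", "2006"].any (fun x => PySem.Str.isIn x u) then ("declined", snip)
    else if PySem.Str.isIn "STATUS CODE" u || PySem.Str.isIn "2106" u then ("declined", snip)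
    else ("error", snip))
    =
    (match PySem.List.min?
        ((pvPriority.filter (fun kp => PySem.Str.isIn kp.1 u)).map (fun kp => kp.2)) (fun x => x) with
     | none => ("error", snip)
     | some best => (if best = 0 ∨ best = 6 then "ccn" else "declined", snip)) := by
  rw [pvMinSorted _ (pvHitsSorted (fun kp => PySem.Str.isIn kp.1 u))]
  rw [pvSplit]
  simp only [List.filter_append, List.map_append, List.head?_append]
  rw [pvGrpHead _ 0 _ (by decide), pvGrpHead _ 1 _ (by decide), pvGrpHead _ 2 _ (by decide),
      pvGrpHead _ 3 _ (by decide), pvGrpHead _ 4 _ (by decide), pvGrpHead _ 5 _ (by decide),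
      pvGrpHead _ 6 _ (by decide), pvGrpHead _ 7 _ (by decide), pvGrpHead _ 8 _ (by decide),
      pvGrpHead _ 9 _ (by decide)]
  -- each group's `any` over the pair list is definitionally A's literal guard over the keyword list
  simp only [List.any_cons, List.any_nil, Bool.or_false]
  generalize (PySem.Str.isIn "CVV" u || _) = g0
  generalize (PySem.Str.isIn "DECLINED" u || _) = g1
  generalize (PySem.Str.isIn "INSUFFICIENT" u || _) = g2
  generalize (PySem.Str.isIn "STATUS CODE 2001" u || _) = g3
  generalize (PySem.Str.isIn "STATUS CODE 2002" u || _) = g4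
  generalize (PySem.Str.isIn "STATUS CODE 2003" u || _) = g5
  generalize (PySem.Str.isIn "STATUS CODE 2004" u || _) = g6
  generalize (PySem.Str.isIn "STATUS CODE 2005" u || _) = g7
  generalize (PySem.Str.isIn "STATUS CODE 2006" u || _) = g8
  generalize (PySem.Str.isIn "STATUS CODE" u || _) = g9
  cases g0 <;> cases g1 <;> cases g2 <;> cases g3 <;> cases g4 <;> cases g5 <;> cases g6 <;>
    cases g7 <;> cases g8 <;> cases g9 <;> rfl

-- ===== VERDICT (by name: the statement is the Claim_ definition above) =====
theorem map_response_to_status_py_spec : Claim_equal_map_response_to_status_py := by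
  intro err_msg _
  unfold Spec_map_response_to_status_py map_response_to_status_py map_response_to_status_py_alt
  exact pvAltEq (PySem.Str.upper err_msg) (PySem.Str.slice err_msg none (some 80))
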